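-- pv_equiv track=rewrite | github.com/aburford/python-stuff | all_palindromes.py | helper
-- ===== SOURCE A (Python) =====
-- def insert(string, i, letter):
-- 	return string[:i] + letter + string[i:]
--
-- def helper(base, mid, i):
-- 	if mid - i >= 0:
-- 		if mid + i >= len(base):
-- 			base += base[mid - i]
-- 			if mid - i == 0:
-- 				yield base
-- 			else:
-- 				for x in helper(base, mid, i + 1):
-- 					yield x
-- 		else:
-- 			if base[mid - i] == base[mid + i]:
-- 				for x in helper(base, mid, i + 1):
-- 					yield x
-- 			else:
-- 				for x in helper(insert(base, mid - i + 1, base[mid + i]), mid + 1, i + 1):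
-- 					yield x
-- 				for x in helper(insert(base, mid + i, base[mid - i]), mid, i + 1):
-- 					yield x
-- 	else:
-- 		if mid + i >= len(base):
-- 			yield base
-- 		else:
-- 			base = base[mid + i] + base
-- 			if mid + i == len(base) - 1:
-- 				yield base
-- 			else:
-- 				for x in helper(base, mid + 1, i + 1):
-- 					yield x
-- ===== SOURCE B (Python) =====
-- def helper(base, mid, i):
-- 	stack = [(base, mid, i)]
-- 	while stack:
-- 		base, mid, i = stack.pop()
-- 		if mid - i >= 0:
-- 			if mid + i >= len(base):
-- 				base += base[mid - i]
-- 				if mid - i == 0: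
-- 					yield base
-- 				else:
-- 					stack.append((base, mid, i + 1))
-- 			elif base[mid - i] == base[mid + i]:
-- 				stack.append((base, mid, i + 1))
-- 			else:
-- 				stack.append((base[:mid + i] + base[mid - i] + base[mid + i:], mid, i + 1))
-- 				stack.append((base[:mid - i + 1] + base[mid + i] + base[mid - i + 1:], mid + 1, i + 1))
-- 		elif mid + i >= len(base):
-- 			yield base
-- 		else:
-- 			stack.append((base[mid + i] + base, mid + 1, i + 1))
-- ===== Notes on version B (the rewrite author's own statement) =====
-- stated objective: alternative
-- what changed: The recursive generator is replaced by an iterative generator driven by an explicit LIFO stack of (base, mid, i) frames (mismatch children pushed in reverse order so the subtrees are yielded in the same sequence), and the locally-dead 'mid+i == len(base)-1' re-check after the prepend is removed.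
import Mathlib
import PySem

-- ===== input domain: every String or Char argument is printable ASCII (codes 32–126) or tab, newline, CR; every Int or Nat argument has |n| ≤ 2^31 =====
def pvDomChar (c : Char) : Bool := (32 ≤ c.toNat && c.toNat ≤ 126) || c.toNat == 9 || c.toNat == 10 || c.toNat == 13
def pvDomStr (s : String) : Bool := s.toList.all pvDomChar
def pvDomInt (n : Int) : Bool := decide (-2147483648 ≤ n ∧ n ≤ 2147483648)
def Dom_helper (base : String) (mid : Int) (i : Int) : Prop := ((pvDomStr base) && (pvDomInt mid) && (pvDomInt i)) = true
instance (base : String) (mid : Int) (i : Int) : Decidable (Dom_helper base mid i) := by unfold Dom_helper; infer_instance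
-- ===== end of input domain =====

-- B replaces the recursive generator by an iterative one over an explicit LIFO stack of frames
-- (mismatch children pushed in reverse order) and drops a locally-dead re-check; same output sequence.

-- ===== PORT A =====

-- measure used for the well-founded recursion of both ports
def pvMeas (L : Nat) (mid i : Int) : Nat :=
  2 * ((L : Int) - (mid + i)).toNat + (mid - i + 1).toNat

-- cited by both ports' decreasing_by: the measure drops when the string grows by one at the end
theorem pvMeas_grow (L : Nat) (mid i : Int) (h : mid - i ≥ 0) :
    pvMeas (L + 1) mid (i + 1) < pvMeas L mid i := by
  unfold pvMeas
  have e1 : ((L + 1 : Nat) : Int) - (mid + (i + 1)) = (L : Int) - (mid + i) := by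
    push_cast; ring
  have e2 : mid - (i + 1) + 1 = mid - i := by ring
  rw [e1, e2]
  exact Nat.add_lt_add_left
    ((Int.toNat_lt_toNat (by linarith)).mpr (lt_add_one _)) _

-- cited by both ports' decreasing_by: the measure drops when only i advances
theorem pvMeas_same (L : Nat) (mid i : Int) (h : mid - i ≥ 0) :
    pvMeas L mid (i + 1) < pvMeas L mid i := by
  unfold pvMeas
  have e2 : mid - (i + 1) + 1 = mid - i := by rw [sub_add_eq_sub_sub]; ring
  rw [e2]
  refine Nat.add_lt_add_of_le_of_lt (Nat.mul_le_mul_left 2 ?_)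
    ((Int.toNat_lt_toNat (by linarith)).mpr (lt_add_one _))
  exact Int.toNat_le_toNat (by linarith)

-- cited by both ports' decreasing_by: the measure drops when both mid and the length grow
theorem pvMeas_shift (L : Nat) (mid i : Int) (h : mid + i < (L : Int)) :
    pvMeas (L + 1) (mid + 1) (i + 1) < pvMeas L mid i := by
  unfold pvMeas
  have e1 : ((L + 1 : Nat) : Int) - (mid + 1 + (i + 1)) = (L : Int) - (mid + i) - 1 := by
    push_cast; ring
  have e2 : mid + 1 - (i + 1) + 1 = mid - i + 1 := by ring
  rw [e1, e2]
  refine Nat.add_lt_add_right ((Nat.mul_lt_mul_left (by decide)).mpr ?_) _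
  exact (Int.toNat_lt_toNat (by linarith)).mpr (by linarith)

-- port of the module helper `insert(string, i, letter)` (exact: PySem slices)
def insertA (l : List Char) (i : Int) (c : Char) : List Char :=
  PySem.List.slice l none (some i) ++ [c] ++ PySem.List.slice l (some i) none

-- cited by both ports' decreasing_by
theorem length_slice_insert (l : List Char) (k : Int) (c : Char) :
    (PySem.List.slice l none (some k) ++ [c] ++
      PySem.List.slice l (some k) none).length = l.length + 1 := by
  have hc : PySem.List.clampIdx l.length k ≤ l.length := PySem.List.clampIdx_le l.length k
  have h0 : PySem.List.clampIdx l.length (0 : Int) = 0 := by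
    rw [show (0 : Int) = ((0 : Nat) : Int) from rfl, PySem.List.clampIdx_natCast]
    exact Nat.min_eq_left (Nat.zero_le _)
  rw [← PySem.List.slice_zero_start (xs := l) (b? := some k)]
  rw [List.length_append, List.length_append, PySem.List.length_slice,
    PySem.List.slice_some_none, List.length_drop, List.length_singleton, h0, Nat.sub_zero,
    Nat.add_right_comm, Nat.add_sub_cancel' hc]

-- cited by helperCore's decreasing_by
theorem length_insertA (l : List Char) (i : Int) (c : Char) :
    (insertA l i c).length = l.length + 1 := length_slice_insert l i c

-- literal transliteration of A on the code-point list (pyGet? none = IndexError, outside Pre_)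
def helperCore (l : List Char) (mid i : Int) : List (List Char) :=
  if mid - i ≥ 0 then
    if mid + i ≥ (l.length : Int) then
      match PySem.List.pyGet? l (mid - i) with
      | none => []
      | some c =>
        if mid - i = 0 then [l ++ [c]]
        else helperCore (l ++ [c]) mid (i + 1)
    else
      match PySem.List.pyGet? l (mid - i), PySem.List.pyGet? l (mid + i) with
      | some c1, some c2 =>
        if c1 = c2 then helperCore l mid (i + 1)
        else helperCore (insertA l (mid - i + 1) c2) (mid + 1) (i + 1) ++
             helperCore (insertA l (mid + i) c1) mid (i + 1)
      | _, _ => []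
  else
    if mid + i ≥ (l.length : Int) then [l]
    else
      match PySem.List.pyGet? l (mid + i) with
      | none => []
      | some c =>
        if mid + i = ((c :: l).length : Int) - 1 then [c :: l]
        else helperCore (c :: l) (mid + 1) (i + 1)
termination_by pvMeas l.length mid i
decreasing_by
  all_goals
    try simp only [List.length_append, List.length_cons, length_insertA]
  all_goals first
    | exact pvMeas_grow _ _ _ (by assumption)
    | exact pvMeas_same _ _ _ (by assumption)
    | exact pvMeas_shift _ _ _ (lt_of_not_ge (by assumption))

def helper (base : String) (mid : Int) (i : Int) : List String :=
  (helperCore base.toList mid i).map (fun l => String.ofList l)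

-- ===== PORT B =====

def pvStackMeas (st : List (List Char × Int × Int)) : Nat :=
  (st.map (fun f => 3 ^ pvMeas f.1.length f.2.1 f.2.2)).sum

-- cited by helperLoop's decreasing_by and by the proofs below
theorem stackMeas_cons (f : List Char × Int × Int) (rest : List (List Char × Int × Int)) :
    pvStackMeas (f :: rest) = 3 ^ pvMeas f.1.length f.2.1 f.2.2 + pvStackMeas rest := by
  simp only [pvStackMeas, List.map_cons, List.sum_cons]

-- cited by helperLoop's decreasing_by: popping a frame shrinks the stack measure
theorem stackMeas_tail_lt (f : List Char × Int × Int) (rest : List (List Char × Int × Int)) :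
    pvStackMeas rest < pvStackMeas (f :: rest) := by
  rw [stackMeas_cons]
  exact Nat.lt_add_of_pos_left (Nat.pow_pos (by decide))

-- cited by helperLoop's decreasing_by: replacing the top frame by a smaller one
theorem stackMeas_cons_lt (f' f : List Char × Int × Int) (rest : List (List Char × Int × Int))
    (h : pvMeas f'.1.length f'.2.1 f'.2.2 < pvMeas f.1.length f.2.1 f.2.2) :
    pvStackMeas (f' :: rest) < pvStackMeas (f :: rest) := by
  rw [stackMeas_cons, stackMeas_cons]
  exact Nat.add_lt_add_right (Nat.pow_lt_pow_right (by decide) h) _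

-- cited by stackMeas_cons2_lt: two powers of three below the m-th sum below it
theorem three_pow_add_lt {a b m : Nat} (ha : a < m) (hb : b < m) : 3 ^ a + 3 ^ b < 3 ^ m := by
  have hm : 0 < m := Nat.lt_of_le_of_lt (Nat.zero_le a) ha
  have hA : 3 ^ a ≤ 3 ^ (m - 1) := Nat.pow_le_pow_right (by decide) (Nat.le_pred_of_lt ha)
  have hB : 3 ^ b ≤ 3 ^ (m - 1) := Nat.pow_le_pow_right (by decide) (Nat.le_pred_of_lt hb)
  calc 3 ^ a + 3 ^ b ≤ 3 ^ (m - 1) + 3 ^ (m - 1) := Nat.add_le_add hA hB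
    _ < 3 ^ (m - 1) + 3 ^ (m - 1) + 3 ^ (m - 1) :=
        Nat.lt_add_of_pos_right (Nat.pow_pos (by decide))
    _ = 3 ^ (m - 1) * 3 := by
        rw [Nat.mul_succ, Nat.mul_succ, Nat.mul_one]
    _ = 3 ^ (m - 1 + 1) := (pow_succ 3 (m - 1)).symm
    _ = 3 ^ m := by rw [Nat.sub_add_cancel hm]

-- cited by helperLoop's decreasing_by: replacing the top frame by two smaller ones
theorem stackMeas_cons2_lt (f1 f2 f : List Char × Int × Int)
    (rest : List (List Char × Int × Int))
    (h1 : pvMeas f1.1.length f1.2.1 f1.2.2 < pvMeas f.1.length f.2.1 f.2.2)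
    (h2 : pvMeas f2.1.length f2.2.1 f2.2.2 < pvMeas f.1.length f.2.1 f.2.2) :
    pvStackMeas (f1 :: f2 :: rest) < pvStackMeas (f :: rest) := by
  rw [stackMeas_cons, stackMeas_cons, stackMeas_cons, ← Nat.add_assoc]
  exact Nat.add_lt_add_right (three_pow_add_lt h1 h2) _

-- literal transliteration of B's while-loop over the explicit stack (frame skipped where
-- Python B would raise IndexError; such frames lie outside Pre_)
def helperLoop (st : List (List Char × Int × Int)) : List (List Char) :=
  match st with
  | [] => []
  | (l, mid, i) :: rest =>
    if mid - i ≥ 0 then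
      if mid + i ≥ (l.length : Int) then
        match PySem.List.pyGet? l (mid - i) with
        | none => helperLoop rest
        | some c =>
          if mid - i = 0 then (l ++ [c]) :: helperLoop rest
          else helperLoop ((l ++ [c], mid, i + 1) :: rest)
      else
        match PySem.List.pyGet? l (mid - i), PySem.List.pyGet? l (mid + i) with
        | some c1, some c2 =>
          if c1 = c2 then helperLoop ((l, mid, i + 1) :: rest)
          else helperLoop
            ((PySem.List.slice l none (some (mid - i + 1)) ++ [c2] ++
                PySem.List.slice l (some (mid - i + 1)) none, mid + 1, i + 1) ::
             (PySem.List.slice l none (some (mid + i)) ++ [c1] ++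
                PySem.List.slice l (some (mid + i)) none, mid, i + 1) :: rest)
        | _, _ => helperLoop rest
    else
      if mid + i ≥ (l.length : Int) then l :: helperLoop rest
      else
        match PySem.List.pyGet? l (mid + i) with
        | none => helperLoop rest
        | some c => helperLoop ((c :: l, mid + 1, i + 1) :: rest)
termination_by pvStackMeas st
decreasing_by
  all_goals first
    | exact stackMeas_tail_lt _ _
    | (refine stackMeas_cons_lt _ (l, mid, i) _ ?_
       simp only [List.length_append, List.length_cons]
       first
         | exact pvMeas_grow l.length mid i ‹mid - i ≥ 0›
         | exact pvMeas_same l.length mid i ‹mid - i ≥ 0›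
         | exact pvMeas_shift l.length mid i (lt_of_not_ge ‹¬ mid + i ≥ (l.length : Int)›))
    | (refine stackMeas_cons2_lt _ _ (l, mid, i) _ ?_ ?_ <;>
        simp only [length_slice_insert] <;>
        first
          | exact pvMeas_shift l.length mid i (lt_of_not_ge ‹¬ mid + i ≥ (l.length : Int)›)
          | exact pvMeas_grow l.length mid i ‹mid - i ≥ 0›)

def helper_alt (base : String) (mid : Int) (i : Int) : List String :=
  (helperLoop [(base.toList, mid, i)]).map (fun l => String.ofList l)

-- ===== PRECONDITION & SPEC =====
-- Pre_ excludes exactly the inputs on which Python A raises IndexError: A raises iff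
-- mid - i ≥ len(base) or mid + i < -len(base), so Pre_ is the complement of the raising set
-- and admits every input on which A returns.
def Pre_helper (base : String) (mid : Int) (i : Int) : Prop :=
  mid - i < (base.length : Int) ∧ mid + i ≥ -(base.length : Int)
instance (base : String) (mid : Int) (i : Int) : Decidable (Pre_helper base mid i) := by
  unfold Pre_helper; infer_instance

def pvWitness_helper : String × Int × Int := ("aba", 1, 0)

def Spec_helper (base : String) (mid : Int) (i : Int) (out : List String) : Prop :=
  out = helper_alt base mid i
instance (base : String) (mid : Int) (i : Int) (out : List String) :
    Decidable (Spec_helper base mid i out) := by unfold Spec_helper; infer_instance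

-- ===== CLAIM (what is proved, stated in full; the proofs are below) =====
def Claim_equal_helper : Prop := ∀ (base : String) (mid : Int) (i : Int),
  Dom_helper base mid i → Pre_helper base mid i → Spec_helper base mid i (helper base mid i)

-- ===== LEMMAS AND PROOFS =====

theorem pow3_lt {a m : Nat} (h : a < m) : 3 ^ a < 3 ^ m :=
  Nat.pow_lt_pow_right (by norm_num) h

theorem helperLoop_cons_aux : ∀ (N : Nat) (l : List Char) (mid i : Int)
    (rest : List (List Char × Int × Int)), pvStackMeas ((l, mid, i) :: rest) ≤ N →
    helperLoop ((l, mid, i) :: rest) = helperCore l mid i ++ helperLoop rest := by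
  intro N
  induction N with
  | zero =>
    intro l mid i rest h
    exfalso
    have h0 : 0 < 3 ^ pvMeas l.length mid i := pow_pos (by norm_num) _
    simp only [pvStackMeas, List.map_cons, List.sum_cons] at h
    omega
  | succ N ih =>
    intro l mid i rest hb
    by_cases h1 : mid - i ≥ 0
    · by_cases h2 : mid + i ≥ (l.length : Int)
      · rw [helperLoop, helperCore, if_pos h1, if_pos h1, if_pos h2, if_pos h2]
        cases hg : PySem.List.pyGet? l (mid - i) with
        | none => simp
        | some c =>
          by_cases h3 : mid - i = 0
          · simp [h3]
          · have hc : pvStackMeas ((l ++ [c], mid, i + 1) :: rest) ≤ N := by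
              have := pow3_lt (a := pvMeas (l.length + 1) mid (i + 1))
                (m := pvMeas l.length mid i) (by simp only [pvMeas]; omega)
              simp only [pvStackMeas, List.map_cons, List.sum_cons, List.length_append,
                List.length_singleton] at hb ⊢
              omega
            simp [h3, ih _ _ _ _ hc]
      · rw [helperLoop, helperCore, if_pos h1, if_pos h1, if_neg h2, if_neg h2]
        cases hg1 : PySem.List.pyGet? l (mid - i) with
        | none => simp
        | some c1 =>
          cases hg2 : PySem.List.pyGet? l (mid + i) with
          | none => simp
          | some c2 =>
            by_cases h3 : c1 = c2
            · have hc : pvStackMeas ((l, mid, i + 1) :: rest) ≤ N := by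
                have := pow3_lt (a := pvMeas l.length mid (i + 1))
                  (m := pvMeas l.length mid i) (by simp only [pvMeas]; omega)
                simp only [pvStackMeas, List.map_cons, List.sum_cons] at hb ⊢
                omega
              simp [h3, ih _ _ _ _ hc]
            · have hμ1 : pvMeas (l.length + 1) (mid + 1) (i + 1) < pvMeas l.length mid i := by
                simp only [pvMeas]; omega
              have hμ2 : pvMeas (l.length + 1) mid (i + 1) < pvMeas l.length mid i := by
                simp only [pvMeas]; omega
              have hc1 : pvStackMeas
                  ((insertA l (mid - i + 1) c2, mid + 1, i + 1) ::
                   (insertA l (mid + i) c1, mid, i + 1) :: rest) ≤ N := by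
                have := three_pow_add_lt hμ1 hμ2
                simp only [pvStackMeas, List.map_cons, List.sum_cons, length_insertA] at hb ⊢
                omega
              have hc2 : pvStackMeas ((insertA l (mid + i) c1, mid, i + 1) :: rest) ≤ N := by
                have h0 : 0 < 3 ^ pvMeas (l.length + 1) (mid + 1) (i + 1) :=
                  pow_pos (by norm_num) _
                have := three_pow_add_lt hμ1 hμ2
                simp only [pvStackMeas, List.map_cons, List.sum_cons, length_insertA] at hb ⊢
                omega
              have e1 := ih _ _ _ _ hc1
              have e2 := ih _ _ _ _ hc2
              simp only [insertA, List.append_assoc, List.singleton_append] at e1 e2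
              simp [h3, List.append_assoc, e1, e2]
              simp [insertA, List.append_assoc]
    · rw [helperLoop, helperCore, if_neg h1, if_neg h1]
      by_cases h2 : mid + i ≥ (l.length : Int)
      · rw [if_pos h2, if_pos h2]
        simp
      · rw [if_neg h2, if_neg h2]
        cases hg : PySem.List.pyGet? l (mid + i) with
        | none => simp
        | some c =>
          have h4 : ¬ (mid + i = (((c :: l).length : Int) - 1)) := by
            simp only [List.length_cons]
            push_cast
            omega
          have hc : pvStackMeas ((c :: l, mid + 1, i + 1) :: rest) ≤ N := by
            have := pow3_lt (a := pvMeas (l.length + 1) (mid + 1) (i + 1))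
              (m := pvMeas l.length mid i) (by simp only [pvMeas]; omega)
            simp only [pvStackMeas, List.map_cons, List.sum_cons, List.length_cons] at hb ⊢
            omega
          simp [ih _ _ _ _ hc]
          intro h
          exfalso
          omega

theorem helperLoop_cons (l : List Char) (mid i : Int) (rest : List (List Char × Int × Int)) :
    helperLoop ((l, mid, i) :: rest) = helperCore l mid i ++ helperLoop rest :=
  helperLoop_cons_aux (pvStackMeas ((l, mid, i) :: rest)) l mid i rest le_rfl

-- ===== VERDICT (by name: the statement is the Claim_ definition above) =====
theorem helper_spec : Claim_equal_helper := by
  intro base mid i _ _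
  unfold Spec_helper helper helper_alt
  rw [helperLoop_cons, helperLoop, List.append_nil]
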